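-- pv_equiv track=rewrite | github.com/mottosen/AdventOfCode | python/AOC25/Day3/Parts/part1.py | handle_line
-- ===== SOURCE A (Python) =====
-- def handle_line(line):
--     line_len = len(line)
--
--     max_10 = 0
--     max_1 = 0
--
--     for i, c in enumerate(line):
--         try:
--             num = int(c)
--             if i < line_len - 2 and num > max_10:
--                 max_10 = num
--                 max_1 = 0
--             elif num > max_1:
--                 max_1 = num
--         except Exception:
--             continue
--
--     res = max_10 * 10 + max_1
--     return res
-- ===== SOURCE B (Python) =====
-- def handle_line(line):
--     n = len(line)
--     max_10, j = 0, -1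
--     for i, c in enumerate(line[:n - 2]):
--         if c.isdigit() and int(c) > max_10:
--             max_10, j = int(c), i
--     max_1 = 0
--     for c in line[j + 1:]:
--         if c.isdigit() and int(c) > max_1:
--             max_1 = int(c)
--     return max_10 * 10 + max_1
-- ===== Notes on version B (the rewrite author's own statement) =====
-- stated objective: alternative
-- what changed: Replaces A's single coupled-state pass (max_10/max_1 with reset) and try/except by two independent passes: pass one scans only line[:n-2] recording the first index j of the maximal digit, pass two takes the max digit over line[j+1:]; isdigit() replaces per-character exception handling.
import Mathlib
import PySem

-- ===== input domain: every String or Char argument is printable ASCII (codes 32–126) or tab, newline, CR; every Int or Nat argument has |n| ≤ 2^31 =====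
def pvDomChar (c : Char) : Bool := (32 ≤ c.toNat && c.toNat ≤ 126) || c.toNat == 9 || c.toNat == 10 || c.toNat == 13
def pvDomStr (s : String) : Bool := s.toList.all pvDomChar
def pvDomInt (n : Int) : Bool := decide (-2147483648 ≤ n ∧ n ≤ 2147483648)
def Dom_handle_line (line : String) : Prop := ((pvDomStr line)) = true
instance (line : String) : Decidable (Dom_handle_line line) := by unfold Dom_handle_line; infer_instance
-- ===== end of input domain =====

-- B replaces A's single coupled-state pass (with max_1 reset) and try/except by two
-- independent passes: find the first index j of the max digit in line[:n-2], then take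
-- the max digit of line[j+1:]; same O(n) cost, plainer decomposition.


-- ===== PORT A =====
-- int(c) for a single printable-ASCII char succeeds exactly when c is a digit '0'..'9',
-- returning its value; any other char raises (the except branch). Exact on Dom.
def pvTryInt? (c : Char) : Option Int :=
  if c.isDigit then some ((c.toNat : Int) - 48) else none

-- the 'for i, c in enumerate(line)' loop of A, carrying (max_10, max_1)
def pvLoopA (b : Int) : Nat → Int × Int → List Char → Int × Int
  | _, s, [] => s
  | i, s, c :: rest =>
    pvLoopA b (i + 1)
      (match pvTryInt? c with
       | none => s
       | some num =>
         if (i : Int) < b ∧ num > s.1 then (num, 0)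
         else if num > s.2 then (s.1, num)
         else s) rest

def handle_line (line : String) : Int :=
  let cs := line.toList
  let s := pvLoopA ((cs.length : Int) - 2) 0 (0, 0) cs
  s.1 * 10 + s.2

-- ===== PORT B =====
def pvDigitVal (c : Char) : Int := (c.toNat : Int) - 48

-- pass one: 'for i, c in enumerate(line[:n-2])', carrying (max_10, j)
def pvLoopB1 : Nat → Int × Int → List Char → Int × Int
  | _, s, [] => s
  | i, s, c :: rest =>
    pvLoopB1 (i + 1)
      (if c.isDigit ∧ pvDigitVal c > s.1 then (pvDigitVal c, (i : Int)) else s) rest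

-- pass two: 'for c in line[j+1:]', carrying max_1
def pvLoopB2 : Int → List Char → Int
  | m, [] => m
  | m, c :: rest => pvLoopB2 (if c.isDigit ∧ pvDigitVal c > m then pvDigitVal c else m) rest

def handle_line_alt (line : String) : Int :=
  let cs := line.toList
  let n := cs.length
  -- line[:n-2] = take (n-2): Nat subtraction clamps to 0 exactly as the negative slice bound gives ''
  let p := pvLoopB1 0 (0, -1) (cs.take (n - 2))
  -- line[j+1:] = drop (j+1): j ≥ -1 always, so j+1 ≥ 0 and the slice is a plain drop
  let m1 := pvLoopB2 0 (cs.drop (p.2 + 1).toNat)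
  p.1 * 10 + m1

-- ===== PRECONDITION & SPEC =====
def Spec_handle_line (line : String) (out : Int) : Prop := out = handle_line_alt line
instance (line : String) (out : Int) : Decidable (Spec_handle_line line out) := by unfold Spec_handle_line; infer_instance

-- ===== CLAIM (what is proved, stated in full; the proofs are below) =====
def Claim_equal_handle_line : Prop := ∀ (line : String), Dom_handle_line line → Spec_handle_line line (handle_line line)

-- ===== LEMMAS AND PROOFS =====

-- Reference recursion: final max_10 together with (some of) the suffix just after the
-- position of its last (= first maximal) update, or none if no update happened.
def pvGoB (b : Int) : Nat → Int → List Char → Int × Option (List Char)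
  | _, m, [] => (m, none)
  | i, m, c :: rest =>
    if (i : Int) < b ∧ c.isDigit ∧ pvDigitVal c > m then
      let r := pvGoB b (i + 1) (pvDigitVal c) rest
      (r.1, some (r.2.getD rest))
    else
      pvGoB b (i + 1) m rest

-- A's loop computes pvGoB's max_10 and, for max_1, folds pvLoopB2 over the suffix after
-- the last max_10 update (over the whole list, from the incoming m1, if none happened).
theorem pvLoopA_eq_goB (b : Int) (l : List Char) : ∀ (i : Nat) (m10 m1 : Int),
    pvLoopA b i (m10, m1) l =
      ((pvGoB b i m10 l).1,
       match (pvGoB b i m10 l).2 with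
       | none => pvLoopB2 m1 l
       | some t => pvLoopB2 0 t) := by
  induction l with
  | nil => intro i m10 m1; simp [pvLoopA, pvGoB, pvLoopB2]
  | cons c rest ih =>
    intro i m10 m1
    by_cases hd : c.isDigit
    · have hsome : pvTryInt? c = some (pvDigitVal c) := by simp [pvTryInt?, pvDigitVal, hd]
      by_cases hC : (i : Int) < b ∧ pvDigitVal c > m10
      · have : pvLoopA b i (m10, m1) (c :: rest) = pvLoopA b (i+1) (pvDigitVal c, 0) rest := by
          simp only [pvLoopA, hsome]
          rw [if_pos hC]
        rw [this, ih]
        have hg : pvGoB b i m10 (c :: rest) =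
            ((pvGoB b (i+1) (pvDigitVal c) rest).1,
             some (((pvGoB b (i+1) (pvDigitVal c) rest).2).getD rest)) := by
          simp [pvGoB, hd, hC.1, hC.2]
        rw [hg]
        cases (pvGoB b (i+1) (pvDigitVal c) rest).2 <;> simp
      · -- elif branch: max_1 updated by the pvLoopB2 step, max_10 unchanged
        have hg : pvGoB b i m10 (c :: rest) = pvGoB b (i+1) m10 rest := by
          simp only [pvGoB]
          rw [if_neg]; rintro ⟨h1, _, h2⟩; exact hC ⟨h1, h2⟩
        have hstep : pvLoopA b i (m10, m1) (c :: rest) =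
            pvLoopA b (i+1) (m10, if pvDigitVal c > m1 then pvDigitVal c else m1) rest := by
          simp only [pvLoopA, hsome]
          rw [if_neg hC]
          split_ifs <;> rfl
        rw [hstep, ih, hg]
        cases hr : (pvGoB b (i+1) m10 rest).2 with
        | none =>
          have : pvLoopB2 m1 (c :: rest) =
              pvLoopB2 (if pvDigitVal c > m1 then pvDigitVal c else m1) rest := by
            by_cases hm : pvDigitVal c > m1 <;> simp [pvLoopB2, hd, hm]
          simp [this]
        | some t => simp
    · have hA : pvLoopA b i (m10, m1) (c :: rest) = pvLoopA b (i+1) (m10, m1) rest := by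
        simp [pvLoopA, pvTryInt?, hd]
      have hg : pvGoB b i m10 (c :: rest) = pvGoB b (i+1) m10 rest := by
        simp [pvGoB, hd]
      rw [hA, ih, hg]
      cases (pvGoB b (i+1) m10 rest).2 <;> simp [pvLoopB2, hd]

theorem pvGoB_stop (b : Int) (l : List Char) : ∀ (i : Nat) (m : Int), b ≤ (i : Int) →
    pvGoB b i m l = (m, none) := by
  induction l with
  | nil => intro i m _; simp [pvGoB]
  | cons c rest ih =>
    intro i m h
    have : ¬ ((i : Int) < b ∧ c.isDigit ∧ pvDigitVal c > m) := by
      rintro ⟨h1, _⟩; omega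
    simp only [pvGoB, if_neg this]
    exact ih (i+1) m (by push_cast; omega)

-- pvGoB over the whole (guarded) list matches B's pass one over the truncated list:
-- same max_10, and the returned suffix is the drop just after the recorded index j.
theorem pvGoB_eq_loopB1 (b : Int) (l : List Char) : ∀ (i : Nat) (m10 j : Int),
    (pvGoB b i m10 l).1 = (pvLoopB1 i (m10, j) (l.take (b.toNat - i))).1 ∧
    ((pvGoB b i m10 l).2 = none → (pvLoopB1 i (m10, j) (l.take (b.toNat - i))).2 = j) ∧
    (∀ t, (pvGoB b i m10 l).2 = some t →
      ∃ k : Nat, (pvLoopB1 i (m10, j) (l.take (b.toNat - i))).2 = (k : Int) ∧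
        i ≤ k ∧ t = l.drop (k + 1 - i)) := by
  induction l with
  | nil => intro i m10 j; simp [pvGoB, pvLoopB1]
  | cons c rest ih =>
    intro i m10 j
    by_cases hi : b.toNat - i = 0
    · have hb : b ≤ (i : Int) := by omega
      rw [pvGoB_stop b (c :: rest) i m10 hb]
      simp [hi, pvLoopB1]
    · have hlt : (i : Int) < b := by omega
      have htk : (c :: rest).take (b.toNat - i) = c :: rest.take (b.toNat - (i+1)) := by
        obtain ⟨k, hk⟩ : ∃ k, b.toNat - i = k + 1 := ⟨b.toNat - i - 1, by omega⟩
        rw [hk]; simp; congr 1; omega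
      by_cases hC : c.isDigit ∧ pvDigitVal c > m10
      · have hg : pvGoB b i m10 (c :: rest) =
            ((pvGoB b (i+1) (pvDigitVal c) rest).1,
             some (((pvGoB b (i+1) (pvDigitVal c) rest).2).getD rest)) := by
          simp [pvGoB, hlt, hC.1, hC.2]
        have hB : pvLoopB1 i (m10, j) ((c :: rest).take (b.toNat - i)) =
            pvLoopB1 (i+1) (pvDigitVal c, (i : Int)) (rest.take (b.toNat - (i+1))) := by
          rw [htk]; simp [pvLoopB1, hC.1, hC.2]
        obtain ⟨ih1, ih2, ih3⟩ := ih (i+1) (pvDigitVal c) (i : Int)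
        refine ⟨by rw [hg, hB]; exact ih1, ?_, ?_⟩
        · intro hnone; rw [hg] at hnone; simp at hnone
        · intro t ht
          rw [hg] at ht
          cases hr : (pvGoB b (i+1) (pvDigitVal c) rest).2 with
          | none =>
            simp [hr] at ht
            refine ⟨i, ?_, le_refl i, ?_⟩
            · rw [hB]; exact ih2 hr
            · subst ht; simp
          | some t' =>
            simp [hr] at ht
            obtain ⟨k, hk1, hk2, hk3⟩ := ih3 t' hr
            refine ⟨k, by rw [hB]; exact hk1, by omega, ?_⟩
            subst ht
            rw [hk3]
            have : k + 1 - i = (k - i) + 1 := by omega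
            rw [this]
            simp
      · have hg : pvGoB b i m10 (c :: rest) = pvGoB b (i+1) m10 rest := by
          simp only [pvGoB]
          rw [if_neg]; rintro ⟨_, h2, h3⟩; exact hC ⟨h2, h3⟩
        have hB : pvLoopB1 i (m10, j) ((c :: rest).take (b.toNat - i)) =
            pvLoopB1 (i+1) (m10, j) (rest.take (b.toNat - (i+1))) := by
          rw [htk]
          simp only [pvLoopB1]
          rw [if_neg hC]
        obtain ⟨ih1, ih2, ih3⟩ := ih (i+1) m10 j
        refine ⟨by rw [hg, hB]; exact ih1, by intro h; rw [hB]; exact ih2 (by rwa [hg] at h), ?_⟩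
        intro t ht
        rw [hg] at ht
        obtain ⟨k, hk1, hk2, hk3⟩ := ih3 t ht
        refine ⟨k, by rw [hB]; exact hk1, by omega, ?_⟩
        rw [hk3]
        have : k + 1 - i = (k - i) + 1 := by omega
        rw [this]
        simp

-- ===== VERDICT (by name: the statement is the Claim_ definition above) =====
theorem handle_line_spec : Claim_equal_handle_line := by
  intro line _
  unfold Spec_handle_line handle_line handle_line_alt
  dsimp only
  set cs := line.toList with hcs
  set b : Int := (cs.length : Int) - 2 with hb
  have hbt : b.toNat - 0 = cs.length - 2 := by
    simp only [hb]; omega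
  rw [pvLoopA_eq_goB b cs 0 0 0]
  obtain ⟨h1, h2, h3⟩ := pvGoB_eq_loopB1 b cs 0 0 (-1)
  rw [hbt] at h1 h2 h3
  cases hr : (pvGoB b 0 0 cs).2 with
  | none =>
    have hj := h2 hr
    simp only [h1, hj]
    norm_num
  | some t =>
    obtain ⟨k, hk1, _, hk3⟩ := h3 t hr
    simp only [h1, hk1, hk3]
    have : ((k : Int) + 1).toNat = k + 1 := by omega
    rw [this]
    simp
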